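-- pv_equiv track=rewrite | github.com/hasanmohsin/discrete_fkc | proteins/esm2_reference_experiment.py | parse_mask_string
-- ===== SOURCE A (Python) =====
-- def parse_mask_string(mask_string):
--     """
--     Parse mask string to extract positions that should be masked
--
--     Args:
--         mask_string: String like "SFNTVDEWLE<MASK>IKMGQYKESF<MASK>N<MASK>GFTSFDVVSQMMMEDILRVGVTL<MASK>GHQKKILNSIQVMR<MASK>QM"
--
--     Returns:
--         List of 0-indexed positions to mask
--     """
--     mask_positions = []
--     position = 0
--
--     i = 0
--     while i < len(mask_string):
--         if mask_string[i:i+6] == '<MASK>':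
--             mask_positions.append(position)
--             i += 6  # Skip the <MASK> token
--             position += 1
--         else:
--             # Regular amino acid
--             i += 1
--             position += 1
--
--     return mask_positions
-- ===== SOURCE B (Python) =====
-- def parse_mask_string(mask_string):
--     """
--     Parse mask string to extract positions that should be masked.
--     Splits on '<MASK>' once and computes each mask's collapsed position as the
--     running sum of segment lengths plus the number of masks already seen,
--     instead of scanning the string character by character.
--     """
--     mask_positions = []
--     position = 0
--     segments = mask_string.split('<MASK>')
--     for seg in segments[:-1]:
--         position += len(seg)
--         mask_positions.append(position)
--         position += 1
--     return mask_positions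
-- ===== Notes on version B (the rewrite author's own statement) =====
-- stated objective: faster
-- what changed: Replaces the per-character while loop (a 6-char slice comparison at every index) by a single split on the mask token followed by a running sum over segment lengths, each mask position being the cumulative segment length plus the number of masks already seen.
import Mathlib
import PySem

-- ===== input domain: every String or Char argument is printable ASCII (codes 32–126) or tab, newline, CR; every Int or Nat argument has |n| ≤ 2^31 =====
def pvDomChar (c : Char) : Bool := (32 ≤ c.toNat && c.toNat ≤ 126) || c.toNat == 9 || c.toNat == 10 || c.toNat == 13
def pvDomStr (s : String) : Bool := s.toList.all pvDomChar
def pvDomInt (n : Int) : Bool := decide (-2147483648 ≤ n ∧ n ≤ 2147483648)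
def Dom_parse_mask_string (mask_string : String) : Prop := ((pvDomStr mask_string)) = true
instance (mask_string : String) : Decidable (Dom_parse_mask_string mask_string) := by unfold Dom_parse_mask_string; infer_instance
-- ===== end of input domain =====

-- B replaces A's per-character scan by a single split on '<MASK>' plus running-sum
-- arithmetic over the segments (objective: faster by a constant factor, measured).


-- ===== PORT A =====
-- the '<MASK>' token as a char list
def pvMaskTok : List Char := ['<', 'M', 'A', 'S', 'K', '>']

-- A's while loop: the index i becomes recursion on the remaining suffix ([] = loop
-- condition i < len fails); mask_string[i:i+6] == '<MASK>' becomes cs.take 6 = pvMaskTok.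
def parse_mask_string_go : List Char → Int → List Int
  | [], _ => []
  | c :: rest, position =>
    if h : (c :: rest).take 6 = pvMaskTok then
      position :: parse_mask_string_go ((c :: rest).drop 6) (position + 1)
    else
      parse_mask_string_go rest (position + 1)
termination_by cs => cs.length
decreasing_by
  · have h6 : 6 ≤ (c :: rest).length := by
      have := congrArg List.length h
      simp [pvMaskTok] at this
      simp only [List.length_cons]
      omega
    simp only [List.length_drop]
    omega
  · simp

def parse_mask_string (mask_string : String) : List Int :=
  parse_mask_string_go mask_string.toList 0

-- ===== PORT B =====
def parse_mask_string_alt (mask_string : String) : List Int :=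
  let segments := PySem.Chars.splitOn mask_string.toList pvMaskTok
  -- for seg in segments[:-1]: position += len(seg); append position; position += 1
  (segments.dropLast.foldl
    (fun acc seg => (acc.1 ++ [acc.2 + (seg.length : Int)], acc.2 + (seg.length : Int) + 1))
    (([] : List Int), (0 : Int))).1

-- ===== PRECONDITION & SPEC =====
def Spec_parse_mask_string (mask_string : String) (out : List Int) : Prop := out = parse_mask_string_alt mask_string
instance (mask_string : String) (out : List Int) : Decidable (Spec_parse_mask_string mask_string out) := by unfold Spec_parse_mask_string; infer_instance

-- ===== CLAIM (what is proved, stated in full; the proofs are below) =====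
def Claim_equal_parse_mask_string : Prop := ∀ (mask_string : String), Dom_parse_mask_string mask_string → Spec_parse_mask_string mask_string (parse_mask_string mask_string)

-- ===== LEMMAS AND PROOFS =====

-- reference recursive form of Python's str.split for the nonempty separator pvMaskTok
def mySplit : List Char → List (List Char)
  | [] => [[]]
  | c :: rest =>
    if h : pvMaskTok.isPrefixOf (c :: rest) then
      [] :: mySplit ((c :: rest).drop 6)
    else
      match mySplit rest with
      | [] => [[c]]
      | s :: ss => (c :: s) :: ss
termination_by cs => cs.length
decreasing_by
  · have h6 : 6 ≤ (c :: rest).length := by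
      have := (List.isPrefixOf_iff_prefix.mp h).length_le
      simpa [pvMaskTok] using this
    simp only [List.length_drop]
    omega
  · simp

theorem mySplit_ne_nil (cs : List Char) : mySplit cs ≠ [] := by
  cases cs with
  | nil => rw [mySplit]; simp
  | cons c rest =>
    rw [mySplit]
    split
    · simp
    · cases mySplit rest <;> simp

-- apply f to the head segment only
def mapHead (f : List Char → List Char) : List (List Char) → List (List Char)
  | [] => []
  | s :: ss => f s :: ss

theorem splitOn_go_eq :
    ∀ (fuel : Nat) (l cur : List Char) (acc : List (List Char)),
      l.length ≤ fuel →
      PySem.Chars.splitOn.go pvMaskTok fuel l cur acc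
        = acc.reverse ++ mapHead (cur.reverse ++ ·) (mySplit l) := by
  intro fuel
  induction fuel with
  | zero =>
    intro l cur acc hl
    have hl0 : l = [] := by
      cases l with
      | nil => rfl
      | cons a t => simp at hl
    subst hl0
    rw [mySplit]
    simp [PySem.Chars.splitOn.go, mapHead]
  | succ n ih =>
    intro l cur acc hl
    cases l with
    | nil =>
      rw [mySplit]
      simp [PySem.Chars.splitOn.go, mapHead]
    | cons c rest =>
      rw [mySplit]
      by_cases hp : pvMaskTok.isPrefixOf (c :: rest)
      · rw [PySem.Chars.splitOn.go]
        rw [if_pos hp]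
        have hsl : pvMaskTok.length = 6 := rfl
        have hdrop : (List.drop pvMaskTok.length (c :: rest)).length ≤ n := by
          rw [hsl]
          simp at hl ⊢
          omega
        rw [ih _ [] _ hdrop]
        rw [dif_pos hp, hsl]
        have hne := mySplit_ne_nil ((c :: rest).drop 6)
        cases hm : mySplit ((c :: rest).drop 6) with
        | nil => exact absurd hm hne
        | cons s ss =>
          simp [mapHead]
      · rw [PySem.Chars.splitOn.go]
        rw [if_neg hp]
        rw [ih rest (c :: cur) acc (by simp at hl; omega)]
        rw [dif_neg hp]
        have hne := mySplit_ne_nil rest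
        cases hm : mySplit rest with
        | nil => exact absurd hm hne
        | cons s ss =>
          simp [mapHead]

theorem splitOn_eq_mySplit (l : List Char) :
    PySem.Chars.splitOn l pvMaskTok = mySplit l := by
  have h := splitOn_go_eq (l.length + 1) l [] [] (by omega)
  have hne := mySplit_ne_nil l
  rw [PySem.Chars.splitOn, h]
  cases hm : mySplit l with
  | nil => exact absurd hm hne
  | cons s ss => simp [mapHead]

-- positions emitted by B's loop over the (already last-dropped) segment list
def emitL : List (List Char) → Int → List Int
  | [], _ => []
  | seg :: rest, pos => (pos + (seg.length : Int)) :: emitL rest (pos + (seg.length : Int) + 1)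

theorem foldl_eq_emitL (L : List (List Char)) :
    ∀ (acc : List Int) (pos : Int),
      (L.foldl (fun acc seg => (acc.1 ++ [acc.2 + (seg.length : Int)], acc.2 + (seg.length : Int) + 1)) (acc, pos)).1
        = acc ++ emitL L pos := by
  induction L with
  | nil => intro acc pos; simp [emitL]
  | cons seg rest ih =>
    intro acc pos
    simp only [List.foldl_cons, emitL]
    rw [ih]
    simp

theorem emitL_dropLast_consHead (c : Char) (s : List Char) (ss : List (List Char)) (pos : Int) :
    emitL (((c :: s) :: ss).dropLast) pos = emitL ((s :: ss).dropLast) (pos + 1) := by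
  cases ss with
  | nil => simp [emitL]
  | cons s2 ss' =>
    simp [List.dropLast, emitL]
    constructor
    · ring
    · congr 1
      ring

theorem take6_iff_prefix (cs : List Char) : cs.take 6 = pvMaskTok ↔ pvMaskTok.isPrefixOf cs := by
  rw [List.isPrefixOf_iff_prefix]
  constructor
  · intro h
    exact h ▸ List.take_prefix 6 cs
  · intro h
    have := List.prefix_iff_eq_take.mp h
    simpa [pvMaskTok] using this.symm

theorem go_eq_emitL (cs : List Char) : ∀ pos : Int,
    parse_mask_string_go cs pos = emitL ((mySplit cs).dropLast) pos := by
  induction hn : cs.length using Nat.strong_induction_on generalizing cs with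
  | _ n ih =>
  intro pos
  cases cs with
  | nil => rw [parse_mask_string_go, mySplit]; simp [emitL]
  | cons c rest =>
    rw [parse_mask_string_go, mySplit]
    by_cases hp : pvMaskTok.isPrefixOf (c :: rest)
    · rw [dif_pos ((take6_iff_prefix _).mpr hp), dif_pos hp]
      have h6 : 6 ≤ (c :: rest).length := by
        have := (List.isPrefixOf_iff_prefix.mp hp).length_le
        simpa [pvMaskTok] using this
      have hlt : ((c :: rest).drop 6).length < n := by
        simp at hn ⊢
        omega
      rw [ih _ (hlt) _ rfl]
      have hne := mySplit_ne_nil ((c :: rest).drop 6)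
      cases hm : mySplit ((c :: rest).drop 6) with
      | nil => exact absurd hm hne
      | cons s ss => simp [emitL, List.dropLast]
    · rw [dif_neg (fun h => hp ((take6_iff_prefix _).mp h)), dif_neg hp]
      have hlt : rest.length < n := by simp at hn; omega
      rw [ih _ hlt _ rfl]
      have hne := mySplit_ne_nil rest
      cases hm : mySplit rest with
      | nil => exact absurd hm hne
      | cons s ss =>
        show emitL ((s :: ss).dropLast) (pos + 1) = emitL (((c :: s) :: ss).dropLast) pos
        rw [emitL_dropLast_consHead]

-- ===== VERDICT (by name: the statement is the Claim_ definition above) =====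
theorem parse_mask_string_spec : Claim_equal_parse_mask_string := by
  intro s _
  unfold Spec_parse_mask_string parse_mask_string parse_mask_string_alt
  rw [splitOn_eq_mySplit, go_eq_emitL, foldl_eq_emitL]
  simp
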